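-- pv_equiv track=rewrite | github.com/katzuv/studies | Exercises/hw4/hw4q1.py | changeToUpper
-- ===== SOURCE A (Python) =====
-- def changeToUpper(my_str, char, num):
--     new_str = ""
--     replaced_characters = 0
--     for character in my_str:
--         if character == char and character.islower() and replaced_characters < num:
--             new_str += character.upper()
--             replaced_characters += 1
--         else:
--             new_str += character
--
--     return new_str
-- ===== SOURCE B (Python) =====
-- def changeToUpper(my_str, char, num):
--     # First pass: collect the indices of the first `num` lowercase occurrences of `char`.
--     indices = set()
--     for i, character in enumerate(my_str):
--         if len(indices) >= num:
--             break
--         if character == char and character.islower():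
--             indices.add(i)
--     # Second pass: rebuild the string, uppercasing exactly the collected positions.
--     return ''.join(c.upper() if i in indices else c
--                    for i, c in enumerate(my_str))
-- ===== Notes on version B (the rewrite author's own statement) =====
-- stated objective: alternative
-- what changed: A's single loop that decides and appends with a replacement counter is replaced by a locate-then-rebuild decomposition: a first pass collects the indices of the first num lowercase occurrences of char into a set (with an early break), and a second pass rebuilds the string with ''.join, uppercasing exactly the collected positions.
import Mathlib
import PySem

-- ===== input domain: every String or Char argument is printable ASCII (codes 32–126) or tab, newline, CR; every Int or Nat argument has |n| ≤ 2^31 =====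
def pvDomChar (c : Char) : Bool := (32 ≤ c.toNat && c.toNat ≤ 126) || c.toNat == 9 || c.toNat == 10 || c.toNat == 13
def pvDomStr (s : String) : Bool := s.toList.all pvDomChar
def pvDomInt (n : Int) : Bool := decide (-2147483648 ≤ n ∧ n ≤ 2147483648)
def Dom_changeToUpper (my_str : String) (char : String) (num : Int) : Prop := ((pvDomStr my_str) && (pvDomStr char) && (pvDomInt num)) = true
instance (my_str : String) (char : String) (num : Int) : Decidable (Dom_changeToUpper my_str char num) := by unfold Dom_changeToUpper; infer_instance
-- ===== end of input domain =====

-- B replaces A's single decision-loop-with-counter by a locate-then-rebuild decomposition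
-- (collect the indices to change into a set, then rebuild the string); objective: alternative
-- structure, same cost.

-- ===== PORT A =====
-- A: one pass over the characters, string accumulator + replacement counter.
def changeToUpper (my_str : String) (char : String) (num : Int) : String :=
  String.ofList
    (my_str.toList.foldl
      (fun (st : List Char × Int) character =>
        if String.ofList [character] = char ∧ PySem.Chars.islower character ∧ st.2 < num then
          (st.1 ++ [PySem.Chars.upperChar character], st.2 + 1)
        else
          (st.1 ++ [character], st.2))
      ([], 0)).1

-- ===== PORT B =====
-- first pass of Source B: collect indices of the first `num` lowercase occurrences of `char`
def altCollect (char : String) (num : Int) : List (Int × Char) → PySem.Set Int → PySem.Set Int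
  | [], idxs => idxs
  | (i, c) :: rest, idxs =>
      if PySem.Set.len idxs ≥ num then idxs            -- break
      else if String.ofList [c] = char ∧ PySem.Chars.islower c then
        altCollect char num rest (PySem.Set.add idxs i)
      else
        altCollect char num rest idxs

-- second pass of Source B: ''.join, uppercasing exactly the collected positions
def changeToUpper_alt (my_str : String) (char : String) (num : Int) : String :=
  let idxs := altCollect char num (PySem.List.enumerate my_str.toList) PySem.Set.empty
  PySem.Str.join ""
    ((PySem.List.enumerate my_str.toList).map
      (fun p => if p.1 ∈ idxs then String.ofList [PySem.Chars.upperChar p.2] else String.ofList [p.2]))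

-- ===== PRECONDITION & SPEC =====
def Spec_changeToUpper (my_str : String) (char : String) (num : Int) (out : String) : Prop := out = changeToUpper_alt my_str char num
instance (my_str : String) (char : String) (num : Int) (out : String) : Decidable (Spec_changeToUpper my_str char num out) := by unfold Spec_changeToUpper; infer_instance

-- ===== CLAIM (what is proved, stated in full; the proofs are below) =====
def Claim_equal_changeToUpper : Prop := ∀ (my_str : String) (char : String) (num : Int), Dom_changeToUpper my_str char num → Spec_changeToUpper my_str char num (changeToUpper my_str char num)

-- ===== LEMMAS AND PROOFS =====

-- spec-side recursion equivalent to A's fold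
def goA (char : String) (num : Int) : List Char → Int → List Char
  | [], _ => []
  | c :: rest, cnt =>
      if String.ofList [c] = char ∧ PySem.Chars.islower c ∧ cnt < num then
        PySem.Chars.upperChar c :: goA char num rest (cnt + 1)
      else
        c :: goA char num rest cnt

theorem foldl_eq_goA (char : String) (num : Int) (l : List Char) (pre : List Char) (cnt : Int) :
    (l.foldl
      (fun (st : List Char × Int) character =>
        if String.ofList [character] = char ∧ PySem.Chars.islower character ∧ st.2 < num then
          (st.1 ++ [PySem.Chars.upperChar character], st.2 + 1)
        else
          (st.1 ++ [character], st.2))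
      (pre, cnt)).1 = pre ++ goA char num l cnt := by
  induction l generalizing pre cnt with
  | nil => simp [goA]
  | cons c rest ih =>
    simp only [List.foldl_cons, goA]
    by_cases h : String.ofList [c] = char ∧ PySem.Chars.islower c = true ∧ cnt < num
    · simp [h, ih]
    · simp [h, ih]

theorem mem_altCollect_of_mem (char : String) (num : Int) (l : List (Int × Char))
    (acc : PySem.Set Int) (j : Int) (hj : j ∈ acc) :
    j ∈ altCollect char num l acc := by
  induction l generalizing acc with
  | nil => simpa [altCollect] using hj
  | cons p rest ih =>
    obtain ⟨i, c⟩ := p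
    simp only [altCollect]
    split_ifs with h1 h2
    · exact hj
    · exact ih _ ((PySem.Set.mem_add acc i j).mpr (Or.inl hj))
    · exact ih _ hj

theorem mem_altCollect_ge (char : String) (num : Int) (l : List Char) (k : Int)
    (acc : PySem.Set Int) (j : Int)
    (hj : j ∈ altCollect char num (PySem.List.enumerate l k) acc) :
    j ∈ acc ∨ k ≤ j := by
  induction l generalizing k acc with
  | nil => exact Or.inl (by simpa [altCollect, PySem.List.enumerate] using hj)
  | cons c rest ih =>
    rw [PySem.List.enumerate_cons] at hj
    simp only [altCollect] at hj
    split_ifs at hj with h1 h2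
    · exact Or.inl hj
    · rcases ih (k + 1) _ hj with h | h
      · rcases (PySem.Set.mem_add acc k j).mp h with h' | h'
        · exact Or.inl h'
        · exact Or.inr (by omega)
      · exact Or.inr (by omega)
    · rcases ih (k + 1) _ hj with h | h
      · exact Or.inl h
      · exact Or.inr (by omega)

-- the break guard freezes the collector once it has `num` indices
theorem altCollect_of_ge (char : String) (num : Int) (l : List (Int × Char))
    (acc : PySem.Set Int) (h : PySem.Set.len acc ≥ num) :
    altCollect char num l acc = acc := by
  cases l with
  | nil => rfl
  | cons p rest =>
    obtain ⟨i, c⟩ := p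
    simp only [altCollect]
    rw [if_pos h]

theorem map_collect_eq_goA (char : String) (num : Int) (l : List Char) (k : Int)
    (acc : PySem.Set Int) (hacc : ∀ j ∈ acc, j < k) :
    (PySem.List.enumerate l k).map
      (fun p => if p.1 ∈ altCollect char num (PySem.List.enumerate l k) acc
                then PySem.Chars.upperChar p.2 else p.2)
    = goA char num l (PySem.Set.len acc) := by
  induction l generalizing k acc with
  | nil => simp [PySem.List.enumerate, goA]
  | cons c rest ih =>
    rw [PySem.List.enumerate_cons, List.map_cons]
    have hk : k ∉ acc := fun h => absurd (hacc k h) (lt_irrefl k)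
    by_cases hge : PySem.Set.len acc ≥ num
    · have hI : altCollect char num ((k, c) :: PySem.List.enumerate rest (k + 1)) acc = acc :=
        altCollect_of_ge _ _ _ _ hge
      simp only [hI, goA]
      rw [if_neg hk,
        if_neg (show ¬(String.ofList [c] = char ∧ PySem.Chars.islower c = true ∧ PySem.Set.len acc < num) by
          rintro ⟨-, -, h⟩; omega)]
      have ht := ih (k + 1) acc (fun j hj => by have := hacc j hj; omega)
      rw [altCollect_of_ge _ _ _ _ hge] at ht
      exact congrArg _ ht
    · have hstep0 : altCollect char num ((k, c) :: PySem.List.enumerate rest (k + 1)) acc =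
          (if String.ofList [c] = char ∧ PySem.Chars.islower c = true then
            altCollect char num (PySem.List.enumerate rest (k + 1)) (PySem.Set.add acc k)
          else
            altCollect char num (PySem.List.enumerate rest (k + 1)) acc) := by
        simp only [altCollect]
        rw [if_neg hge]
      by_cases hc : String.ofList [c] = char ∧ PySem.Chars.islower c = true
      · rw [if_pos hc] at hstep0
        simp only [hstep0, goA]
        rw [if_pos (mem_altCollect_of_mem _ _ _ _ _ ((PySem.Set.mem_add acc k k).mpr (Or.inr rfl))),
          if_pos ⟨hc.1, hc.2, by omega⟩]
        have hlen : PySem.Set.len (PySem.Set.add acc k) = PySem.Set.len acc + 1 := by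
          simp [PySem.Set.len, PySem.Set.add, List.contains_eq_mem, hk]
        have ht := ih (k + 1) (PySem.Set.add acc k)
          (fun j hj => by
            rcases (PySem.Set.mem_add acc k j).mp hj with h | h
            · have := hacc j h; omega
            · omega)
        rw [hlen] at ht
        exact congrArg _ ht
      · rw [if_neg hc] at hstep0
        simp only [hstep0, goA]
        have hknotin : k ∉ altCollect char num (PySem.List.enumerate rest (k + 1)) acc := by
          intro h
          rcases mem_altCollect_ge char num rest (k + 1) acc k h with h' | h'
          · exact hk h'
          · omega
        rw [if_neg hknotin, if_neg (by rintro ⟨h1, h2, -⟩; exact hc ⟨h1, h2⟩)]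
        exact congrArg _ (ih (k + 1) acc (fun j hj => by have := hacc j hj; omega))

theorem intersperse_nil_flatten (L : List (List Char)) :
    (List.intersperse [] L).flatten = L.flatten := by
  induction L with
  | nil => rfl
  | cons a t ih => cases t <;> simp_all [List.intersperse]

theorem flatMap_single {α : Type} (l : List α) (g : α → Char) :
    List.flatMap (fun x => [g x]) l = l.map g := by
  induction l with
  | nil => rfl
  | cons a t ih => simp_all [List.flatMap]

-- ''.join of singleton strings is String.ofList of the characters
theorem join_singletons {α : Type} (l : List α) (g : α → Char) :
    PySem.Str.join "" (l.map (fun x => String.ofList [g x])) = String.ofList (l.map g) := by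
  simp [PySem.Str.join, PySem.Chars.join, List.intercalate, List.map_map,
    intersperse_nil_flatten, Function.comp_def, ← List.flatMap_def, flatMap_single]

-- ===== VERDICT (by name: the statement is the Claim_ definition above) =====
theorem changeToUpper_spec : Claim_equal_changeToUpper := by
  intro my_str char num _
  show changeToUpper my_str char num = changeToUpper_alt my_str char num
  simp only [changeToUpper, changeToUpper_alt]
  rw [foldl_eq_goA]
  rw [show ((PySem.List.enumerate my_str.toList).map
      (fun p => if p.1 ∈ altCollect char num (PySem.List.enumerate my_str.toList) PySem.Set.empty
                then String.ofList [PySem.Chars.upperChar p.2] else String.ofList [p.2]))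
    = ((PySem.List.enumerate my_str.toList).map
        (fun p => String.ofList [if p.1 ∈ altCollect char num (PySem.List.enumerate my_str.toList) PySem.Set.empty
                  then PySem.Chars.upperChar p.2 else p.2])) from by
      apply List.map_congr_left; intro p _; split_ifs <;> rfl]
  rw [join_singletons]
  rw [map_collect_eq_goA char num my_str.toList 0 PySem.Set.empty (fun j hj => by cases hj)]
  rfl
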